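-- pv_equiv track=rewrite | github.com/Mubashir-Ansari/Information-Retrieval-System | models.py | tokenize_query
-- ===== SOURCE A (Python) =====
-- def tokenize_query(query):
--     tokens = []
--     current_term = ''
--     for char in query:
--         if char in '&|()-':
--             if current_term:
--                 tokens.append(current_term)
--                 current_term = ''
--             tokens.append(char)
--         else:
--             current_term += char
--     if current_term:
--         tokens.append(current_term)
--     return tokens
-- ===== SOURCE B (Python) =====
-- OPS = frozenset('&|()-')
--
-- def tokenize_query(query):
--     tokens = []
--     i, n = 0, len(query)
--     while i < n:
--         if query[i] in OPS:
--             tokens.append(query[i])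
--             i += 1
--         else:
--             j = i
--             while j < n and query[j] not in OPS:
--                 j += 1
--             tokens.append(query[i:j])
--             i = j
--     return tokens
-- ===== Notes on version B (the rewrite author's own statement) =====
-- stated objective: alternative
-- what changed: Replaced the per-character accumulator loop (tokens + mutable current_term flushed at operators and at the end) with an index-based scanner that, at each position, either emits the operator or finds the end of the maximal non-operator run and emits it as one slice.
import Mathlib
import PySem

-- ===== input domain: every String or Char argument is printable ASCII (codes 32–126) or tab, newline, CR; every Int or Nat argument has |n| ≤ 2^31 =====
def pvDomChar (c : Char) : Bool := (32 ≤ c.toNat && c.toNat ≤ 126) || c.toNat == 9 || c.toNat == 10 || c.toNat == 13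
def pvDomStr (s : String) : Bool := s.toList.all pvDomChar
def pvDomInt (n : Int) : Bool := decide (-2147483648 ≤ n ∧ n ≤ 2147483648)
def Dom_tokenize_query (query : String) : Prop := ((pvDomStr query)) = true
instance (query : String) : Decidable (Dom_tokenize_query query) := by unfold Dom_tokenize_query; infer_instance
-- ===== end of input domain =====

-- B replaces A's per-character accumulator loop with a maximal-run scanner (alternative, same cost).

-- char in '&|()-'  (shared operator test, used by both ports)
def isOp (c : Char) : Bool := c = '&' || c = '|' || c = '(' || c = ')' || c = '-'

-- ===== PORT A =====
-- A's loop state: (tokens, current_term); current_term kept as List Char (a Python str is its characters).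
def tokAStep (s : List String × List Char) (c : Char) : List String × List Char :=
  if isOp c then
    (if s.2 ≠ [] then s.1 ++ [String.ofList s.2, String.ofList [c]] else s.1 ++ [String.ofList [c]], [])
  else
    (s.1, s.2 ++ [c])

def tokAFin (r : List String × List Char) : List String :=
  if r.2 ≠ [] then r.1 ++ [String.ofList r.2] else r.1

def tokenize_query (query : String) : List String :=
  tokAFin (query.toList.foldl tokAStep ([], []))

-- ===== PORT B =====
-- Source B's outer while: at each position emit the operator, or scan the maximal non-operator run
-- (the inner j-while = takeWhile/dropWhile) and emit it as one slice.
def tokB : List Char → List String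
  | [] => []
  | c :: rest =>
    if isOp c then String.ofList [c] :: tokB rest
    else
      String.ofList (c :: rest.takeWhile (fun d => !isOp d)) ::
        tokB (rest.dropWhile (fun d => !isOp d))
  termination_by l => l.length
  decreasing_by
    · simp
    · simp only [List.length_cons]
      exact Nat.lt_succ_of_le (List.length_dropWhile_le _ _)

def tokenize_query_alt (query : String) : List String := tokB query.toList

-- ===== PRECONDITION & SPEC =====
def Spec_tokenize_query (query : String) (out : List String) : Prop := out = tokenize_query_alt query
instance (query : String) (out : List String) : Decidable (Spec_tokenize_query query out) := by unfold Spec_tokenize_query; infer_instance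

-- ===== CLAIM (what is proved, stated in full; the proofs are below) =====
def Claim_equal_tokenize_query : Prop := ∀ (query : String), Dom_tokenize_query query → Spec_tokenize_query query (tokenize_query query)

-- ===== LEMMAS AND PROOFS =====

-- rest is [] or starts with an operator
def opFront (rest : List Char) : Prop := rest = [] ∨ ∃ c t, rest = c :: t ∧ isOp c = true

theorem span_of_nonop (ds rest : List Char) (h : ∀ c ∈ ds, isOp c = false) (hr : opFront rest) :
    (ds ++ rest).takeWhile (fun d => !isOp d) = ds ∧ (ds ++ rest).dropWhile (fun d => !isOp d) = rest := by
  induction ds with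
  | nil =>
    rcases hr with h0 | ⟨c, t, rfl, hc⟩
    · simp [h0]
    · simp [hc]
  | cons d ds ih =>
    have hd : isOp d = false := h d (by simp)
    have := ih (fun c hc => h c (by simp [hc]))
    simp [hd, this.1, this.2]

theorem tokB_run (cur rest : List Char) (h : ∀ c ∈ cur, isOp c = false) (hr : opFront rest) :
    tokB (cur ++ rest) = (if cur ≠ [] then [String.ofList cur] else []) ++ tokB rest := by
  cases cur with
  | nil => simp
  | cons d ds =>
    have hd : isOp d = false := h d (by simp)
    have hsp := span_of_nonop ds rest (fun c hc => h c (by simp [hc])) hr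
    rw [List.cons_append, tokB]
    simp [hd, hsp.1, hsp.2]

theorem tokB_nil : tokB [] = [] := by rw [tokB]

theorem main_inv (l : List Char) : ∀ (toks : List String) (cur : List Char),
    (∀ c ∈ cur, isOp c = false) →
    tokAFin (l.foldl tokAStep (toks, cur)) = toks ++ tokB (cur ++ l) := by
  induction l with
  | nil =>
    intro toks cur h
    have hrun := tokB_run cur [] h (Or.inl rfl)
    rw [List.foldl_nil, List.append_nil]
    by_cases hc : cur = []
    · subst hc; simp [tokAFin, tokB_nil]
    · rw [List.append_nil, tokB_nil, List.append_nil] at hrun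
      simp only [ne_eq, hc, not_false_eq_true, if_pos] at hrun
      simp [tokAFin, hc, hrun]
  | cons c l ih =>
    intro toks cur h
    by_cases hc : isOp c = true
    · have hrun := tokB_run cur (c :: l) h (Or.inr ⟨c, l, rfl, hc⟩)
      rw [tokB] at hrun
      simp only [hc, if_pos] at hrun
      by_cases hcur : cur = []
      · subst hcur
        simp only [List.foldl_cons, tokAStep, hc, if_pos, ne_eq, not_true_eq_false,
          not_false_eq_true, if_neg]
        rw [ih (toks ++ [String.ofList [c]]) [] (by simp)]
        simpa using hrun.symm
      · simp only [List.foldl_cons, tokAStep, hc, if_pos, ne_eq, hcur, not_false_eq_true, if_pos]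
        rw [ih (toks ++ [String.ofList cur, String.ofList [c]]) [] (by simp)]
        simp [hrun, hcur]
    · have hc' : isOp c = false := by simpa using hc
      simp only [List.foldl_cons, tokAStep, hc', Bool.false_eq_true, reduceIte]
      rw [ih toks (cur ++ [c]) (by intro d hd
                                   rcases List.mem_append.1 hd with h1 | h1
                                   · exact h d h1
                                   · simp at h1; simpa [h1] using hc')]
      simp

-- ===== VERDICT (by name: the statement is the Claim_ definition above) =====
theorem tokenize_query_spec : Claim_equal_tokenize_query := by
  intro query _
  unfold Spec_tokenize_query tokenize_query tokenize_query_alt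
  simpa using main_inv query.toList [] [] (by simp)
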